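-- pv_equiv track=rewrite | github.com/Lacenlot/estrutura-dados | q4.py | conseguir_sair
-- ===== SOURCE A (Python) =====
-- from typing import List
--
-- def conseguir_sair(stack, placa):
--     carros_para_retirar: List[int] = []
--     for element in stack[::-1]:
--         if element != placa:
--             carros_para_retirar.append(element)
--         elif element == placa:
--             return carros_para_retirar
--
--     return 'Não existe nenhum carro com essa placa'
-- ===== SOURCE B (Python) =====
-- def conseguir_sair(stack, placa):
--     if placa not in stack:
--         return 'Não existe nenhum carro com essa placa'
--     pos = len(stack) - 1 - stack[::-1].index(placa)
--     return stack[pos + 1:][::-1]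
-- ===== Notes on version B (the rewrite author's own statement) =====
-- stated objective: simpler
-- what changed: B replaces A's element-by-element reversed scan with an accumulator list by a last-occurrence position lookup followed by a reversed slice (find-then-slice instead of accumulate-while-scanning).
import Mathlib
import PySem

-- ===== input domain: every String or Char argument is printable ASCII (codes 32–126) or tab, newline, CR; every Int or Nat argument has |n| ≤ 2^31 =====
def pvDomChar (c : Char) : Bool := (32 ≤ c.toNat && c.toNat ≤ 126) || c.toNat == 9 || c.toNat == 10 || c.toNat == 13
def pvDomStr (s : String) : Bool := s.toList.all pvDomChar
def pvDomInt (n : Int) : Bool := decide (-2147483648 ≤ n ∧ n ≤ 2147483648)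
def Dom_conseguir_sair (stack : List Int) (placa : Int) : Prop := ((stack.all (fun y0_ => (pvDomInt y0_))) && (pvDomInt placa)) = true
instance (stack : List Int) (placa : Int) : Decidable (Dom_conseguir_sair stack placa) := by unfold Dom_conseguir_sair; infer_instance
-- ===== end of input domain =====

-- B computes the last occurrence of placa and returns a reversed slice instead of
-- accumulating during A's reversed scan (objective: simpler decomposition).


-- ===== PORT A =====
-- the for-loop over stack[::-1], carrying the accumulator carros_para_retirar;
-- both Pythons return the same fallback string when placa is absent; it is ported as 'none'.
def conseguirSairLoop (placa : Int) (acc : List Int) : List Int → Option (List Int)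
  | [] => none
  | element :: rest =>
      if element ≠ placa then conseguirSairLoop placa (acc ++ [element]) rest
      else some acc

def conseguir_sair (stack : List Int) (placa : Int) : Option (List Int) :=
  conseguirSairLoop placa [] stack.reverse

-- ===== PORT B =====
def conseguir_sair_alt (stack : List Int) (placa : Int) : Option (List Int) :=
  if ¬ stack.contains placa then none   -- the fallback string, ported as 'none' (same as in port A)
  else
    match PySem.List.index? stack.reverse placa with
    | none => none                       -- unreachable: placa ∈ stack
    | some i =>
        let pos : Int := (stack.length : Int) - 1 - (i : Int)
        some ((PySem.List.slice stack (some (pos + 1)) none).reverse)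

-- ===== PRECONDITION & SPEC =====
-- Pre_ excludes inputs where placa does not occur in stack: there A returns the fallback
-- string (not a value of the declared Optional[list[int]] type); B returns the same string.
def Pre_conseguir_sair (stack : List Int) (placa : Int) : Prop := placa ∈ stack
instance (stack : List Int) (placa : Int) : Decidable (Pre_conseguir_sair stack placa) := by unfold Pre_conseguir_sair; infer_instance

def pvWitness_conseguir_sair : List Int × Int := ([3, 7, 5], 7)

def Spec_conseguir_sair (stack : List Int) (placa : Int) (out : Option (List Int)) : Prop := out = conseguir_sair_alt stack placa
instance (stack : List Int) (placa : Int) (out : Option (List Int)) : Decidable (Spec_conseguir_sair stack placa out) := by unfold Spec_conseguir_sair; infer_instance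

-- ===== CLAIM (what is proved, stated in full; the proofs are below) =====
def Claim_equal_conseguir_sair : Prop := ∀ (stack : List Int) (placa : Int), Dom_conseguir_sair stack placa → Pre_conseguir_sair stack placa → Spec_conseguir_sair stack placa (conseguir_sair stack placa)

-- ===== LEMMAS AND PROOFS =====

-- A's loop, characterised by the first index of placa in the traversed list.
theorem conseguirSairLoop_eq_index? (placa : Int) :
    ∀ (l : List Int) (acc : List Int),
      conseguirSairLoop placa acc l =
        match PySem.List.index? l placa with
        | none => none
        | some i => some (acc ++ l.take i) := by
  intro l
  induction l with
  | nil => intro acc; simp [conseguirSairLoop, PySem.List.index?]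
  | cons x xs ih =>
      intro acc
      by_cases hx : x = placa
      · subst hx
        rw [PySem.List.index?_cons_self]
        simp [conseguirSairLoop]
      · rw [PySem.List.index?_cons_of_ne xs hx]
        simp only [conseguirSairLoop, if_pos hx]
        rw [ih (acc ++ [x])]
        cases h : PySem.List.index? xs placa with
        | none => simp
        | some i => simp

theorem index?_lt_length {l : List Int} {v : Int} {i : ℕ}
    (h : PySem.List.index? l v = some i) : i < l.length := by
  rcases (PySem.List.index?_eq_some_iff _ _ _).1 h with ⟨pre, suf, hl, hlen, -⟩
  subst hl; subst hlen
  simp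

-- ===== VERDICT =====
theorem conseguir_sair_spec : Claim_equal_conseguir_sair := by
  unfold Claim_equal_conseguir_sair
  intro stack placa _ _
  unfold Spec_conseguir_sair conseguir_sair conseguir_sair_alt
  rw [conseguirSairLoop_eq_index?]
  cases h : PySem.List.index? stack.reverse placa with
  | none =>
      have hnm : placa ∉ stack := by
        have := (PySem.List.index?_eq_none_iff _ _).1 h
        simpa using this
      rw [if_pos (by simpa using hnm)]
  | some i =>
      have hmem : placa ∈ stack := by
        have : placa ∈ stack.reverse :=
          (PySem.List.index?_isSome_iff _ _).1 (by rw [h]; rfl)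
        simpa using this
      rw [if_neg (by simpa using hmem)]
      have hi : i < stack.length := by
        have := index?_lt_length h
        simpa using this
      simp only [List.nil_append]
      congr 1
      have hcast : (stack.length : Int) - 1 - (i : Int) + 1 = ((stack.length - i : ℕ) : Int) := by
        push_cast [Nat.cast_sub (le_of_lt hi)]; ring
      rw [hcast, PySem.List.slice_from_natCast]
      rw [List.reverse_drop]
      congr 1
      omega
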